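-- pv_equiv track=rewrite | github.com/qhxiv/code-ptit-solutions | Python/PY03008 - ĐỒ THỊ HÌNH SAO.py | solve
-- ===== SOURCE A (Python) =====
-- def solve(cnt):
--     n = len(cnt) - 1
--     f = False
--     for i in range(1, n + 1):
--         if cnt[i] != 1 and cnt[i] != n - 1:
--             return "No"
--         if f and cnt[i] != 1:
--             return "No"
--         if not f and cnt[i] == n - 1:
--             f = True
--     return "Yes"
-- ===== SOURCE B (Python) =====
-- def solve(cnt):
--     n = len(cnt) - 1
--     c = {}
--     for d in cnt[1:]:
--         c[d] = c.get(d, 0) + 1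
--     for k in c:
--         if k != 1 and k != n - 1:
--             return "No"
--     if n - 1 != 1 and c.get(n - 1, 0) > 1:
--         return "No"
--     return "Yes"
-- ===== Notes on version B (the rewrite author's own statement) =====
-- stated objective: alternative
-- what changed: Replaced A's single flag-carrying scan with early returns by building a frequency table of the degrees cnt[1:] once (a dict counter) and then judging it: all distinct degrees must lie in {1, n-1}, and when n-1 != 1 the degree n-1 may occur at most once.
import Mathlib
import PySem

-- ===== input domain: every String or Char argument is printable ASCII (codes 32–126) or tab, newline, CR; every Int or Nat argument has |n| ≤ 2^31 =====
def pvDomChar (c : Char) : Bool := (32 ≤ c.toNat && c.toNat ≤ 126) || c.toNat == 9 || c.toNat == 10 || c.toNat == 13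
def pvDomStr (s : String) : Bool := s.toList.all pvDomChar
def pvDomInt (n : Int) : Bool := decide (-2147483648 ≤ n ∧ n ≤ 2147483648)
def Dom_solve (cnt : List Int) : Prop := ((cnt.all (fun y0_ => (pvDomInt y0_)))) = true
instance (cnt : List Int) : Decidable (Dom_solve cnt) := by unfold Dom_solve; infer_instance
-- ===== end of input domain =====

-- B replaces A's flag-carrying index scan by a degree-frequency table (dict) inspected once; objective: idiomatic/alternative, not faster.

-- ===== PORT A =====
-- A's for-loop with early returns and the flag f, over i in range(1, n+1);
-- indices are always in range (1 ≤ i ≤ len-1), so pyGetD's default is never used.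
def solveLoopA (cnt : List Int) (n : Int) (f : Bool) : List Int → String
  | [] => "Yes"
  | i :: rest =>
    let ci := PySem.List.pyGetD cnt i 0
    if ci ≠ 1 ∧ ci ≠ n - 1 then "No"
    else if f = true ∧ ci ≠ 1 then "No"
    else if f = false ∧ ci = n - 1 then solveLoopA cnt n true rest
    else solveLoopA cnt n f rest

def solve (cnt : List Int) : String :=
  let n : Int := (cnt.length : Int) - 1
  solveLoopA cnt n false (PySem.List.pyRange 1 (n + 1) 1)

-- ===== PORT B =====
def solve_alt (cnt : List Int) : String :=
  let n : Int := (cnt.length : Int) - 1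
  let c := (PySem.List.slice cnt (some 1) none).foldl
      (fun d x => d.insert x (d.getD x 0 + 1)) (PySem.Dict.empty : PySem.Dict Int Int)
  if c.keys.any (fun k => decide (k ≠ 1 ∧ k ≠ n - 1)) then "No"
  else if n - 1 ≠ 1 ∧ c.getD (n - 1) 0 > 1 then "No"
  else "Yes"

-- ===== PRECONDITION & SPEC =====
def Spec_solve (cnt : List Int) (out : String) : Prop := out = solve_alt cnt
instance (cnt : List Int) (out : String) : Decidable (Spec_solve cnt out) := by unfold Spec_solve; infer_instance

-- ===== CLAIM (what is proved, stated in full; the proofs are below) =====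
def Claim_equal_solve : Prop := ∀ (cnt : List Int), Dom_solve cnt → Spec_solve cnt (solve cnt)

-- ===== LEMMAS AND PROOFS =====

-- A's loop re-expressed over the values cnt[1:], same branch structure.
def valLoop (n : Int) (f : Bool) : List Int → String
  | [] => "Yes"
  | x :: rest =>
    if x ≠ 1 ∧ x ≠ n - 1 then "No"
    else if f = true ∧ x ≠ 1 then "No"
    else if f = false ∧ x = n - 1 then valLoop n true rest
    else valLoop n f rest

lemma loopA_eq_valLoop (cnt : List Int) (f : Bool) :
    ∀ (k a : Nat), cnt.length - a = k → 1 ≤ a →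
      solveLoopA cnt ((cnt.length : Int) - 1) f
          (PySem.List.pyRange (a : Int) (((cnt.length : Int) - 1) + 1) 1)
        = valLoop ((cnt.length : Int) - 1) f (cnt.drop a) := by
  intro k
  induction k generalizing f with
  | zero =>
    intro a hk ha
    have hlen : cnt.length ≤ a := by omega
    rw [PySem.List.pyRange_one_eq_nil (by omega),
        List.drop_eq_nil_of_le hlen]
    rfl
  | succ k ih =>
    intro a hk ha
    have hlt : a < cnt.length := by omega
    rw [PySem.List.pyRange_one_cons (by omega),
        List.drop_eq_getElem_cons hlt]
    show (if _ then _ else _) = _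
    simp only [PySem.List.pyGetD_natCast]
    rw [List.getD_eq_getElem cnt 0 hlt]
    simp only [valLoop]
    have e1 : ((a : Int) + 1) = ((a + 1 : Nat) : Int) := by push_cast; ring
    split_ifs <;> (try rfl) <;> rw [e1] <;> exact ih _ (a+1) (by omega) (by omega)

lemma valLoop_true (n : Int) (l : List Int) :
    valLoop n true l = if (∀ x ∈ l, x = 1) then "Yes" else "No" := by
  induction l with
  | nil => simp [valLoop]
  | cons x rest ih =>
    rw [valLoop]
    by_cases h1 : x = 1
    · subst h1
      rw [if_neg (by simp), if_neg (by simp), if_neg (by simp), ih]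
      simp
    · by_cases h2 : x = n - 1
      · rw [if_neg (by simp [h2]), if_pos (by simp [h1])]
        simp [h1]
      · rw [if_pos ⟨h1, h2⟩]
        simp [h1]

lemma valLoop_false (n : Int) (l : List Int) :
    valLoop n false l =
      if (∀ x ∈ l, x = 1 ∨ x = n - 1) ∧ (n - 1 = 1 ∨ l.count (n - 1) ≤ 1)
      then "Yes" else "No" := by
  induction l with
  | nil => simp [valLoop]
  | cons x rest ih =>
    rw [valLoop]
    by_cases h1 : x = 1
    · subst h1
      rw [if_neg (by simp), if_neg (by simp)]
      by_cases h2 : (1 : Int) = n - 1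
      · rw [if_pos (by simp [← h2]), valLoop_true]
        have hall : ∀ y, (y ∈ (1 : Int) :: rest → y = 1 ∨ y = n - 1) ↔ (y ∈ (1 : Int) :: rest → y = 1) := by
          intro y; rw [← h2]; simp [or_self]
        by_cases hr : ∀ y ∈ rest, y = 1
        · rw [if_pos hr, if_pos]
          refine ⟨fun y hy => ?_, Or.inl h2.symm⟩
          rcases List.mem_cons.mp hy with h | h
          · exact Or.inl h
          · exact Or.inl (hr _ h)
        · rw [if_neg hr, if_neg]
          rintro ⟨hmem, -⟩
          exact hr fun y hy => ((hall y).mp (fun _ => hmem y (List.mem_cons_of_mem _ hy))) (List.mem_cons_of_mem _ hy)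
      · have h2' : n - 1 ≠ 1 := fun h => h2 h.symm
        rw [if_neg (fun hh => h2 hh.2), ih]
        have hc : ((1 : Int) :: rest).count (n - 1) = rest.count (n - 1) := by
          simp [h2]
        simp [hc]
    · by_cases h2 : x = n - 1
      · subst h2
        have hne : n - 1 ≠ 1 := h1
        rw [if_neg (by simp), if_neg (by simp), if_pos (by simp), valLoop_true]
        have hc : ((n - 1) :: rest).count (n - 1) = rest.count (n - 1) + 1 := by
          simp
        by_cases hall : ∀ y ∈ rest, y = 1
        · have hz : rest.count (n - 1) = 0 :=
            List.count_eq_zero.mpr fun hm => hne (hall _ hm)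
          rw [if_pos hall, if_pos]
          refine ⟨fun y hy => ?_, Or.inr (by omega)⟩
          rcases List.mem_cons.mp hy with hy | hy
          · exact Or.inr hy
          · exact Or.inl (hall _ hy)
        · rw [if_neg hall, if_neg]
          rintro ⟨hmem, hcnt⟩
          apply hall
          intro y hy
          rcases hmem y (List.mem_cons_of_mem _ hy) with h | h
          · exact h
          · exfalso
            rcases hcnt with h' | h'
            · exact hne h'
            · have : 1 ≤ rest.count (n - 1) := List.one_le_count_iff.mpr (h ▸ hy)
              omega
      · rw [if_pos ⟨h1, h2⟩]
        simp [h1, h2]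

lemma alt_char (cnt : List Int) :
    solve_alt cnt =
      if (∀ x ∈ cnt.tail, x = 1 ∨ x = (cnt.length : Int) - 1 - 1)
          ∧ ((cnt.length : Int) - 1 - 1 = 1 ∨ cnt.tail.count ((cnt.length : Int) - 1 - 1) ≤ 1)
      then "Yes" else "No" := by
  simp only [solve_alt, PySem.List.slice_from_one,
    PySem.Dict.foldl_insert_getD_add_one_eq_counter,
    PySem.Dict.getD_counter, PySem.Dict.keys_counter]
  set n : Int := (cnt.length : Int) - 1 with hn
  by_cases hA : (List.any (PySem.Set.ofList cnt.tail) fun k => decide (k ≠ 1 ∧ k ≠ n - 1)) = true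
  · rw [if_pos hA, if_neg]
    rintro ⟨hmem, -⟩
    rw [List.any_eq_true] at hA
    obtain ⟨k, hk, hkp⟩ := hA
    rw [PySem.Set.mem_ofList] at hk
    simp only [decide_eq_true_eq] at hkp
    rcases hmem k hk with h | h
    · exact hkp.1 h
    · exact hkp.2 h
  · rw [if_neg hA]
    by_cases hB : (n - 1 ≠ 1 ∧ ((List.count (n - 1) cnt.tail : Int)) > 1)
    · rw [if_pos hB, if_neg]
      rintro ⟨-, hcnt⟩
      rcases hcnt with h | h
      · exact hB.1 h
      · have hle : ((List.count (n - 1) cnt.tail : Int)) ≤ 1 := by exact_mod_cast h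
        omega
    · rw [if_neg hB, if_pos]
      constructor
      · intro x hx
        by_contra hcon
        push Not at hcon
        exact hA (List.any_eq_true.mpr ⟨x, (PySem.Set.mem_ofList _ _).mpr hx, by simp [hcon.1, hcon.2]⟩)
      · by_cases hc : n - 1 = 1
        · exact Or.inl hc
        · have hng : ¬ (((List.count (n - 1) cnt.tail : Int)) > 1) := fun hg => hB ⟨hc, hg⟩
          refine Or.inr ?_
          omega

-- ===== VERDICT (by name: the statement is the Claim_ definition above) =====
theorem solve_spec : Claim_equal_solve := by
  intro cnt _
  show solve cnt = solve_alt cnt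
  rw [alt_char]
  simp only [solve]
  have h := loopA_eq_valLoop cnt false (cnt.length - 1) 1 rfl (le_refl 1)
  push_cast at h
  rw [h, valLoop_false, List.drop_one]
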